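-- pv_equiv track=rewrite | github.com/queengooborg/mc-toolkit | lib/get_items_120.py | convert_recipe_pattern
-- ===== SOURCE A (Python) =====
-- def convert_recipe_pattern(ingredients, raw_pattern):
-- 	count = {i: 0 for i in ingredients.values()}
--
-- 	pattern = []
--
-- 	for raw_row in raw_pattern:
-- 		row = []
-- 		for key in raw_row:
-- 			if key == ' ':
-- 				row.append("")
-- 			elif key in ingredients:
-- 				row.append(ingredients[key])
-- 				count[ingredients[key]] += 1
-- 			else:
-- 				raise Exception(f'Character "{key}" found in pattern, but corresponding ingredient does not exist (have {ingredients.items()})')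
-- 		pattern.append(row)
--
-- 	return pattern, count
-- ===== SOURCE B (Python) =====
-- def convert_recipe_pattern(ingredients, raw_pattern):
-- 	# flatten once, validate up front, then build pattern and counts in separate passes
-- 	cells = [key for raw_row in raw_pattern for key in raw_row]
-- 	for key in cells:
-- 		if key != ' ' and key not in ingredients:
-- 			raise Exception(f'Character "{key}" found in pattern, but corresponding ingredient does not exist (have {ingredients.items()})')
--
-- 	pattern = [["" if key == ' ' else ingredients[key] for key in raw_row]
-- 	           for raw_row in raw_pattern]
--
-- 	count = {i: 0 for i in ingredients.values()}
-- 	for key in cells: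
-- 		if key != ' ':
-- 			count[ingredients[key]] += 1
--
-- 	return pattern, count
-- ===== Notes on version B (the rewrite author's own statement) =====
-- stated objective: alternative
-- what changed: A interleaves cell translation and counting in one nested loop with a shared mutable count; B flattens the pattern once, validates up front, builds the pattern with a comprehension and does the counting in a separate pass over the flattened cells.
import Mathlib
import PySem

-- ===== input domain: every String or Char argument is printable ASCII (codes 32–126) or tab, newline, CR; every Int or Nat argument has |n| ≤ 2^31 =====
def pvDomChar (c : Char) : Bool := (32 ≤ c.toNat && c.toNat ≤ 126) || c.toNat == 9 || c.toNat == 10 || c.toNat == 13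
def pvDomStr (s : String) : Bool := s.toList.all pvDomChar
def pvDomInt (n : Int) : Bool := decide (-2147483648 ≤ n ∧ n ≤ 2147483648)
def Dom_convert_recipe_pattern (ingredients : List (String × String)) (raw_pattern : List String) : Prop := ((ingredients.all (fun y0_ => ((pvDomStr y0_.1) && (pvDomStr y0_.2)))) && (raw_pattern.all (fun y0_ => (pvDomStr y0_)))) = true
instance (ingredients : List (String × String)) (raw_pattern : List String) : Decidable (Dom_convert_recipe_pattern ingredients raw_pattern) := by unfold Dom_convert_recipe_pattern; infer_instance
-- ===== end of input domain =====

-- B replaces A's single interleaved build-and-count loop by flatten + validate + comprehension + a separate counting pass (alternative decomposition, same cost).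

-- ===== PORT A =====
-- one character step of A's inner loop; the final 'else' (Python raises) leaves the state unchanged — those inputs are outside Pre_
def pvA_cellStep (d : PySem.Dict String String) (rc : List String × PySem.Dict String Int) (key : Char) : List String × PySem.Dict String Int :=
  if key = ' ' then (rc.1 ++ [""], rc.2)
  else if d.contains (String.singleton key) then
    (rc.1 ++ [d.getD (String.singleton key) ""], rc.2.modify (d.getD (String.singleton key) "") 0 (· + 1))
  else rc

def pvA_rowStep (d : PySem.Dict String String) (acc : List (List String) × PySem.Dict String Int) (raw_row : String) : List (List String) × PySem.Dict String Int :=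
  let rc := raw_row.toList.foldl (pvA_cellStep d) ([], acc.2)
  (acc.1 ++ [rc.1], rc.2)

def convert_recipe_pattern (ingredients : List (String × String)) (raw_pattern : List String) : List (List String) × (List (String × Int)) :=
  let d := PySem.Dict.ofList ingredients
  let count := d.values.foldl (fun c i => c.insert i 0) PySem.Dict.empty
  let pc := raw_pattern.foldl (pvA_rowStep d) ([], count)
  (pc.1, pc.2.items)

-- ===== PORT B =====
def pvB_cell (d : PySem.Dict String String) (k : Char) : String :=
  if k = ' ' then "" else d.getD (String.singleton k) ""

def pvB_countStep (d : PySem.Dict String String) (c : PySem.Dict String Int) (k : Char) : PySem.Dict String Int :=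
  if k = ' ' then c else c.modify (d.getD (String.singleton k) "") 0 (· + 1)

-- Source B's up-front validation loop only raises (outside Pre_); it computes nothing, so it has no counterpart here
def convert_recipe_pattern_alt (ingredients : List (String × String)) (raw_pattern : List String) : List (List String) × (List (String × Int)) :=
  let d := PySem.Dict.ofList ingredients
  let cells := raw_pattern.flatMap (·.toList)
  let pattern := raw_pattern.map (fun raw_row => raw_row.toList.map (pvB_cell d))
  let count0 := d.values.foldl (fun c i => c.insert i 0) PySem.Dict.empty
  let count := cells.foldl (pvB_countStep d) count0
  (pattern, count.items)

-- ===== PRECONDITION & SPEC =====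
-- Pre_ excludes exactly the inputs where A raises: a pattern character that is not ' ' and not a key of ingredients
def Pre_convert_recipe_pattern (ingredients : List (String × String)) (raw_pattern : List String) : Prop :=
  (raw_pattern.all (fun s => s.toList.all (fun k => k == ' ' || (PySem.Dict.ofList ingredients).contains (String.singleton k)))) = true
instance (ingredients : List (String × String)) (raw_pattern : List String) : Decidable (Pre_convert_recipe_pattern ingredients raw_pattern) := by unfold Pre_convert_recipe_pattern; infer_instance

def pvWitness_convert_recipe_pattern : (List (String × String)) × List String := ([("a", "apple"), ("b", "stick")], ["ab", " a"])

def Spec_convert_recipe_pattern (ingredients : List (String × String)) (raw_pattern : List String) (out : List (List String) × (List (String × Int))) : Prop := out = convert_recipe_pattern_alt ingredients raw_pattern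
instance (ingredients : List (String × String)) (raw_pattern : List String) (out : List (List String) × (List (String × Int))) : Decidable (Spec_convert_recipe_pattern ingredients raw_pattern out) := by unfold Spec_convert_recipe_pattern; infer_instance

-- ===== CLAIM (what is proved, stated in full; the proofs are below) =====
def Claim_equal_convert_recipe_pattern : Prop := ∀ (ingredients : List (String × String)) (raw_pattern : List String), Dom_convert_recipe_pattern ingredients raw_pattern → Pre_convert_recipe_pattern ingredients raw_pattern → Spec_convert_recipe_pattern ingredients raw_pattern (convert_recipe_pattern ingredients raw_pattern)

-- ===== LEMMAS AND PROOFS =====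

theorem pvA_inner_eq (d : PySem.Dict String String) (l : List Char) :
    ∀ (r : List String) (c : PySem.Dict String Int),
      (∀ k ∈ l, k = ' ' ∨ d.contains (String.singleton k) = true) →
      l.foldl (pvA_cellStep d) (r, c) = (r ++ l.map (pvB_cell d), l.foldl (pvB_countStep d) c) := by
  induction l with
  | nil => intro r c _; simp
  | cons k l ih =>
    intro r c h
    have hk := h k (by simp)
    by_cases hsp : k = ' '
    · simp only [List.foldl_cons, pvA_cellStep, pvB_countStep, if_pos hsp]
      rw [ih (r ++ [""]) c (fun x hx => h x (by simp [hx]))]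
      simp [pvB_cell, hsp]
    · have hc : d.contains (String.singleton k) = true := by
        rcases hk with h1 | h1
        · exact absurd h1 hsp
        · exact h1
      simp only [List.foldl_cons, pvA_cellStep, pvB_countStep, if_neg hsp, if_pos hc]
      rw [ih _ _ (fun x hx => h x (by simp [hx]))]
      simp [pvB_cell, hsp]

theorem pvA_rows_eq (d : PySem.Dict String String) (rows : List String) :
    ∀ (p : List (List String)) (c : PySem.Dict String Int),
      (∀ s ∈ rows, ∀ k ∈ s.toList, k = ' ' ∨ d.contains (String.singleton k) = true) →
      rows.foldl (pvA_rowStep d) (p, c) =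
        (p ++ rows.map (fun s => s.toList.map (pvB_cell d)),
         (rows.flatMap (·.toList)).foldl (pvB_countStep d) c) := by
  induction rows with
  | nil => intro p c _; simp
  | cons s rows ih =>
    intro p c h
    simp only [List.foldl_cons]
    have hstep : pvA_rowStep d (p, c) s =
        (p ++ [s.toList.map (pvB_cell d)], s.toList.foldl (pvB_countStep d) c) := by
      unfold pvA_rowStep
      rw [pvA_inner_eq d s.toList [] c (h s (by simp))]
      simp
    rw [hstep, ih _ _ (fun t ht => h t (by simp [ht]))]
    simp [List.foldl_append]

-- ===== VERDICT (by name: the statement is the Claim_ definition above) =====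
theorem convert_recipe_pattern_spec : Claim_equal_convert_recipe_pattern := by
  intro ingredients raw_pattern _ hpre
  have h : ∀ s ∈ raw_pattern, ∀ k ∈ s.toList, k = ' ' ∨
      (PySem.Dict.ofList ingredients).contains (String.singleton k) = true := by
    simp only [Pre_convert_recipe_pattern, List.all_eq_true, Bool.or_eq_true, beq_iff_eq] at hpre
    exact hpre
  simp only [Spec_convert_recipe_pattern, convert_recipe_pattern, convert_recipe_pattern_alt]
  rw [pvA_rows_eq (PySem.Dict.ofList ingredients) raw_pattern _ _ h]
  simp
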